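-- pv_equiv track=rewrite | github.com/usMath/tetris-4w-solver | solver_lib.py | get_pc_saves
-- ===== SOURCE A (Python) =====
-- def get_queue_orders(queue):
--     if len(queue) == 1:
--         yield queue[0]
--         return
--     for queue_order in get_queue_orders(queue[1:]):
--         yield queue[0] + queue_order
--     for queue_order in get_queue_orders(queue[0] + queue[2:]):
--         yield queue[1] + queue_order
--
-- def get_pc_saves(piece_queue, pcs):
--     saves = {}
--     for queue_order in get_queue_orders(piece_queue):
--         if queue_order[:-1] in pcs:
--             saves[queue_order[-1]] = queue_order[:-1]
--         if queue_order in pcs: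
--             saves["X"] = queue_order
--     return saves
-- ===== SOURCE B (Python) =====
-- def get_pc_saves(piece_queue, pcs):
--     n = len(piece_queue)
--     relevant = [p for p in pcs if len(p) == n or len(p) == n - 1]
--     pref = {p[:i] for p in relevant for i in range(len(p) + 1)}
--     pcs_set = set(pcs)
--     saves = {}
--
--     def go(built, queue):
--         if built not in pref:
--             return
--         if len(queue) == 1:
--             order = built + queue
--             if order[:-1] in pcs_set:
--                 saves[order[-1]] = order[:-1]
--             if order in pcs_set:
--                 saves["X"] = order
--             return
--         go(built + queue[0], queue[1:])
--         go(built + queue[1], queue[0] + queue[2:])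
--
--     go("", piece_queue)
--     return saves
-- ===== Notes on version B (the rewrite author's own statement) =====
-- stated objective: faster
-- what changed: B precomputes the set of all prefixes of the pcs entries of relevant length (n and n-1) and does a DFS over hold-reachable orderings that prunes every branch whose built prefix is not in that set, instead of A's exhaustive generation of all 2^(n-1)-ish orderings followed by membership filtering.
import Mathlib
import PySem

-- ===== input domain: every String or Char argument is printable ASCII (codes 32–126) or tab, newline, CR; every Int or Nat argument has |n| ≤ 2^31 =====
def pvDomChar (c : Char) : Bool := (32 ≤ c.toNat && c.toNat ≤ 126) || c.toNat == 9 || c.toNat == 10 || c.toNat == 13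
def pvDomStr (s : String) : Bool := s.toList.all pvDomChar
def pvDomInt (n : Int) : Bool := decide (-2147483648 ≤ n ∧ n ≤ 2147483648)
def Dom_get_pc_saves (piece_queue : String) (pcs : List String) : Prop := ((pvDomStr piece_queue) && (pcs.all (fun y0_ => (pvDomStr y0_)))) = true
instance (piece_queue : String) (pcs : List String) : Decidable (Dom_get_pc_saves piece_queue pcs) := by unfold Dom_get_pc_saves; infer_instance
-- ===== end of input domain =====

-- B replaces A's exhaustive generation of every hold-reachable ordering (exponential) by a
-- DFS over orderings pruned with a precomputed set of all prefixes of the relevant pcs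
-- entries, visiting only branches that can still hit a pcs member.
-- This file proves the RETURN values equal on Pre_ (nonempty queue, where A terminates).

-- ===== PORT A =====
-- get_queue_orders(queue), queues as lists of chars; empty queue excluded by Pre_
-- (Python recurses forever there; this port returns [] on [] — never reached under Pre_).
def pvGen (q : List Char) : List (List Char) :=
  match q with
  | [] => []
  | [c] => [[c]]
  | a :: b :: rest =>
      ((pvGen (b :: rest)).map (fun o => a :: o)) ++
      ((pvGen (a :: rest)).map (fun o => b :: o))
termination_by q.length
decreasing_by all_goals simp

-- body of A's loop: the two membership tests and dict updates for one queue_order o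
-- (o[:-1] = o.dropLast; o[-1] = the one-char string o.drop (o.length - 1), o is never empty)
def pvStep (pcs : List String) (d : PySem.Dict String String) (o : List Char) :
    PySem.Dict String String :=
  let d1 := if pcs.contains (String.ofList o.dropLast) then
      d.insert (String.ofList (o.drop (o.length - 1))) (String.ofList o.dropLast) else d
  if pcs.contains (String.ofList o) then d1.insert "X" (String.ofList o) else d1

def get_pc_saves (piece_queue : String) (pcs : List String) : List (String × String) :=
  ((pvGen piece_queue.toList).foldl (pvStep pcs) PySem.Dict.empty).items

-- ===== PORT B =====
-- pcs entries whose length can matter (len n or n-1)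
def pvRelevant (n : Nat) (pcs : List String) : List String :=
  pcs.filter (fun p => (p.toList.length == n) || ((p.toList.length : Int) == (n : Int) - 1))

-- the set of all prefixes p[:i] of relevant pcs entries (as char lists)
def pvPref (n : Nat) (pcs : List String) : PySem.Set (List Char) :=
  PySem.Set.ofList (((pvRelevant n pcs).map String.toList).flatMap
    (fun p => (List.range (p.length + 1)).map (fun i => p.take i)))

-- go(built, queue): prune unless built is in pref, at a leaf do A's two checks, else recurse
def pvGo (pref : PySem.Set (List Char)) (pcsSet : PySem.Set String)
    (saves : PySem.Dict String String) (built queue : List Char) :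
    PySem.Dict String String :=
  if PySem.Set.contains pref built then
    match queue with
    | [] => saves  -- Python raises IndexError here; unreachable under Pre_
    | [c] =>
        let order := built ++ [c]
        let d := if pcsSet.contains (String.ofList order.dropLast) then
            saves.insert (String.ofList (order.drop (order.length - 1)))
              (String.ofList order.dropLast) else saves
        if pcsSet.contains (String.ofList order) then d.insert "X" (String.ofList order) else d
    | a :: b :: rest =>
        pvGo pref pcsSet (pvGo pref pcsSet saves (built ++ [a]) (b :: rest))
          (built ++ [b]) (a :: rest)
  else saves
termination_by queue.length
decreasing_by all_goals simp

def get_pc_saves_alt (piece_queue : String) (pcs : List String) : List (String × String) :=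
  (pvGo (pvPref piece_queue.toList.length pcs) (PySem.Set.ofList pcs)
    PySem.Dict.empty [] piece_queue.toList).items

-- ===== PRECONDITION & SPEC =====
-- Pre_ excludes only the empty piece_queue, on which A's generator recurses forever
-- (RecursionError) and B raises IndexError.
def Pre_get_pc_saves (piece_queue : String) (pcs : List String) : Prop :=
  piece_queue.toList ≠ []
instance (piece_queue : String) (pcs : List String) : Decidable (Pre_get_pc_saves piece_queue pcs) := by unfold Pre_get_pc_saves; infer_instance

def pvWitness_get_pc_saves : String × List String := ("TIO", ["TI", "IOT"])

def Spec_get_pc_saves (piece_queue : String) (pcs : List String) (out : List (String × String)) : Prop := out = get_pc_saves_alt piece_queue pcs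
instance (piece_queue : String) (pcs : List String) (out : List (String × String)) : Decidable (Spec_get_pc_saves piece_queue pcs out) := by unfold Spec_get_pc_saves; infer_instance

-- ===== CLAIM (what is proved, stated in full; the proofs are below) =====
def Claim_equal_get_pc_saves : Prop := ∀ (piece_queue : String) (pcs : List String), Dom_get_pc_saves piece_queue pcs → Pre_get_pc_saves piece_queue pcs → Spec_get_pc_saves piece_queue pcs (get_pc_saves piece_queue pcs)

-- ===== LEMMAS AND PROOFS =====

-- every ordering produced by pvGen has the length of the queue
theorem pvGen_length (q : List Char) : ∀ o ∈ pvGen q, o.length = q.length := by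
  induction q using pvGen.induct with
  | case1 => simp [pvGen]
  | case2 c => simp [pvGen]
  | case3 a b rest ih1 ih2 =>
      intro o ho
      simp only [pvGen, List.mem_append, List.mem_map] at ho
      rcases ho with ⟨o', ho', rfl⟩ | ⟨o', ho', rfl⟩
      · simpa using ih1 o' ho'
      · simpa using ih2 o' ho'

-- membership in the prefix set = being a prefix of some relevant pcs entry
theorem mem_pvPref (n : Nat) (pcs : List String) (l : List Char) :
    l ∈ pvPref n pcs ↔ ∃ p ∈ pvRelevant n pcs, l <+: p.toList := by
  unfold pvPref
  rw [PySem.Set.mem_ofList]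
  simp only [List.mem_flatMap, List.mem_map, List.mem_range]
  constructor
  · rintro ⟨pl, ⟨p, hp, rfl⟩, i, hi, rfl⟩
    exact ⟨p, hp, List.take_prefix i p.toList⟩
  · rintro ⟨p, hp, hpre⟩
    exact ⟨p.toList, ⟨p, hp, rfl⟩, l.length,
      by have := hpre.length_le; omega,
      (List.prefix_iff_eq_take.mp hpre).symm⟩

-- if built is not in the prefix set, A's loop body is a no-op on every order extending built
theorem pvStep_noop (n : Nat) (pcs : List String) (built o : List Char)
    (hm : ¬ built ∈ pvPref n pcs) (hne : o ≠ [])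
    (hlen : built.length + o.length = n) (d : PySem.Dict String String) :
    pvStep pcs d (built ++ o) = d := by
  have hfull : pcs.contains (String.ofList (built ++ o)) = false := by
    by_contra h
    have hmem : String.ofList (built ++ o) ∈ pcs := by
      rw [← List.contains_iff_mem]
      simpa using h
    apply hm
    rw [mem_pvPref]
    refine ⟨String.ofList (built ++ o), ?_, ?_⟩
    · unfold pvRelevant
      rw [List.mem_filter]
      refine ⟨hmem, ?_⟩
      simp
      omega
    · simp
  have hpre : pcs.contains (String.ofList (built ++ o).dropLast) = false := by
    obtain ⟨c, o', rfl⟩ : ∃ c o', o = c :: o' := by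
      cases o with
      | nil => exact absurd rfl hne
      | cons c o' => exact ⟨c, o', rfl⟩
    by_contra h
    have hmem : String.ofList ((built ++ c :: o').dropLast) ∈ pcs := by
      rw [← List.contains_iff_mem]
      simpa using h
    have hdl : (built ++ c :: o').dropLast = built ++ (c :: o').dropLast :=
      List.dropLast_append_cons
    apply hm
    rw [mem_pvPref]
    refine ⟨String.ofList ((built ++ c :: o').dropLast), ?_, ?_⟩
    · unfold pvRelevant
      rw [List.mem_filter]
      refine ⟨hmem, ?_⟩
      have hlist : (String.ofList ((built ++ c :: o').dropLast)).toList
          = (built ++ c :: o').dropLast := by simp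
      rw [Bool.or_eq_true]
      right
      simp only [hlist]
      have hlen2 : (built ++ c :: o').dropLast.length = n - 1 := by
        simp [List.length_dropLast]
        simp at hlen
        omega
      rw [beq_iff_eq, hlen2]
      have : 1 ≤ n := by simp at hlen; omega
      omega
    · rw [hdl]
      simp
  simp only [pvStep, hfull, hpre]
  simp

theorem foldl_noop {α β : Type} (f : β → α → β) (l : List α) (d : β)
    (h : ∀ (d' : β) (o : α), o ∈ l → f d' o = d') : l.foldl f d = d := by
  induction l generalizing d with
  | nil => rfl
  | cons x xs ih =>
      rw [List.foldl_cons, h d x (List.mem_cons_self ..)]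
      exact ih d (fun d' o ho => h d' o (List.mem_cons_of_mem _ ho))

-- all of A's loop iterations over orderings extending a pruned prefix are no-ops
theorem foldl_noop_of_unreached (n : Nat) (pcs : List String) (queue built : List Char)
    (d : PySem.Dict String String) (hb : ¬ built ∈ pvPref n pcs) (hq : queue ≠ [])
    (hlen : built.length + queue.length = n) :
    ((pvGen queue).map (fun o => built ++ o)).foldl (pvStep pcs) d = d := by
  apply foldl_noop
  intro d' x hx
  simp only [List.mem_map] at hx
  obtain ⟨o, ho, rfl⟩ := hx
  have hol : o.length = queue.length := pvGen_length queue o ho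
  apply pvStep_noop n pcs built o hb
  · intro h
    subst h
    simp at hol
    exact hq (List.length_eq_zero_iff.mp hol.symm)
  · omega

-- main invariant: the pruned DFS computes exactly A's fold over all orderings
theorem pvGo_eq (n : Nat) (pcs : List String) :
    ∀ (queue built : List Char) (d : PySem.Dict String String), queue ≠ [] →
      built.length + queue.length = n →
      pvGo (pvPref n pcs) (PySem.Set.ofList pcs) d built queue
        = ((pvGen queue).map (fun o => built ++ o)).foldl (pvStep pcs) d := by
  intro queue
  induction queue using pvGen.induct with
  | case1 => intro built d hne; exact absurd rfl hne
  | case2 c =>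
      intro built d _ hlen
      by_cases hb : built ∈ pvPref n pcs
      · unfold pvGo
        rw [if_pos (by simpa [PySem.Set.contains] using hb)]
        simp [pvGen, pvStep]
      · unfold pvGo
        rw [if_neg (by simpa [PySem.Set.contains] using hb)]
        exact (foldl_noop_of_unreached n pcs [c] built d hb (by simp) hlen).symm
  | case3 a b rest ih1 ih2 =>
      intro built d _ hlen
      by_cases hb : built ∈ pvPref n pcs
      · unfold pvGo
        rw [if_pos (by simpa [PySem.Set.contains] using hb)]
        have h1 : (built ++ [a]).length + (b :: rest).length = n := by
          simp at hlen ⊢; omega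
        have h2 : (built ++ [b]).length + (a :: rest).length = n := by
          simp at hlen ⊢; omega
        show pvGo _ _ (pvGo _ _ d (built ++ [a]) (b :: rest)) (built ++ [b]) (a :: rest) = _
        rw [ih1 (built ++ [a]) d (by simp) h1,
            ih2 (built ++ [b]) _ (by simp) h2]
        have e1 : (fun o => built ++ (a :: o)) = (fun o => (built ++ [a]) ++ o) := by
          funext o; simp
        have e2 : (fun o => built ++ (b :: o)) = (fun o => (built ++ [b]) ++ o) := by
          funext o; simp
        simp only [pvGen, List.map_append, List.map_map, Function.comp_def,
          List.foldl_append, e1, e2]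
      · unfold pvGo
        rw [if_neg (by simpa [PySem.Set.contains] using hb)]
        exact (foldl_noop_of_unreached n pcs (a :: b :: rest) built d hb (by simp) hlen).symm

-- ===== VERDICT (by name: the statement is the Claim_ definition above) =====
theorem get_pc_saves_spec : Claim_equal_get_pc_saves := by
  intro piece_queue pcs _ hpre
  unfold Spec_get_pc_saves get_pc_saves get_pc_saves_alt
  rw [pvGo_eq piece_queue.toList.length pcs piece_queue.toList [] PySem.Dict.empty hpre
    (by simp)]
  simp
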